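-- pv_equiv track=rewrite | github.com/Anton250/crypto | src/algorythms/magma.py | _encrypt_function
-- ===== SOURCE A (Python) =====
-- SUBSITUTION_BLOCK = [
--     (1, 7, 14, 13, 0, 5, 8, 3, 4, 15, 10, 6, 9, 12, 11, 2),
--     (8, 14, 2, 5, 6, 9, 1, 12, 15, 4, 11, 0, 13, 10, 3, 7),
--     (5, 13, 15, 6, 9, 2, 12, 10, 11, 7, 8, 1, 4, 3, 14, 0),
--     (7, 15, 5, 10, 8, 1, 6, 13, 0, 9, 3, 14, 11, 4, 2, 12),
--     (12, 8, 2, 1, 13, 4, 15, 6, 7, 0, 10, 5, 3, 14, 9, 11),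
--     (11, 3, 5, 8, 2, 15, 10, 13, 14, 1, 7, 4, 12, 9, 6, 0),
--     (6, 8, 2, 3, 9, 10, 5, 12, 1, 14, 4, 7, 11, 13, 0, 15),
--     (12, 4, 6, 2, 10, 5, 11, 9, 14, 8, 13, 7, 0, 3, 15, 1),
-- ]
--
-- def _encrypt_function(part:int, key:int):
--     '''
--     Функция шифрования
--     '''
--     temp_val = hex((part + key) % (2**32))[2:].zfill(8) # складываем по модулю 2^32
--     result = ''
--     for i in range(8):
--         # производим простую замену по таблице
--         result += hex(SUBSITUTION_BLOCK[i][int(temp_val[i],16)])[2:]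
--     result = bin(int(result,16))[2:].zfill(32)
--     result = result[11:] + result[:11] # циклический сдвиг на 11 бит
--     return int(result, 2)
-- ===== SOURCE B (Python) =====
-- SUBSITUTION_BLOCK = [
--     (1, 7, 14, 13, 0, 5, 8, 3, 4, 15, 10, 6, 9, 12, 11, 2),
--     (8, 14, 2, 5, 6, 9, 1, 12, 15, 4, 11, 0, 13, 10, 3, 7),
--     (5, 13, 15, 6, 9, 2, 12, 10, 11, 7, 8, 1, 4, 3, 14, 0),
--     (7, 15, 5, 10, 8, 1, 6, 13, 0, 9, 3, 14, 11, 4, 2, 12),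
--     (12, 8, 2, 1, 13, 4, 15, 6, 7, 0, 10, 5, 3, 14, 9, 11),
--     (11, 3, 5, 8, 2, 15, 10, 13, 14, 1, 7, 4, 12, 9, 6, 0),
--     (6, 8, 2, 3, 9, 10, 5, 12, 1, 14, 4, 7, 11, 13, 0, 15),
--     (12, 4, 6, 2, 10, 5, 11, 9, 14, 8, 13, 7, 0, 3, 15, 1),
-- ]
--
-- def _encrypt_function(part: int, key: int):
--     '''Pure shift/mask re-implementation: no hex/bin string round-trips.'''
--     s = (part + key) & 0xFFFFFFFF
--     out = 0
--     for i in range(8):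
--         sh = 28 - 4 * i
--         out |= SUBSITUTION_BLOCK[i][(s >> sh) & 0xF] << sh
--     return ((out << 11) | (out >> 21)) & 0xFFFFFFFF
-- ===== Notes on version B (the rewrite author's own statement) =====
-- stated objective: idiomatic
-- what changed: B replaces A's hex-string/binary-string round-trips (hex, zfill, slicing, int(...,16), bin, string rotation) by direct shift-and-mask integer arithmetic on the 32-bit word: nibbles are extracted with (s >> sh) & 0xF, substituted values OR-ed back at the same position, and the 11-bit left rotation done with shifts.
import Mathlib
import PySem

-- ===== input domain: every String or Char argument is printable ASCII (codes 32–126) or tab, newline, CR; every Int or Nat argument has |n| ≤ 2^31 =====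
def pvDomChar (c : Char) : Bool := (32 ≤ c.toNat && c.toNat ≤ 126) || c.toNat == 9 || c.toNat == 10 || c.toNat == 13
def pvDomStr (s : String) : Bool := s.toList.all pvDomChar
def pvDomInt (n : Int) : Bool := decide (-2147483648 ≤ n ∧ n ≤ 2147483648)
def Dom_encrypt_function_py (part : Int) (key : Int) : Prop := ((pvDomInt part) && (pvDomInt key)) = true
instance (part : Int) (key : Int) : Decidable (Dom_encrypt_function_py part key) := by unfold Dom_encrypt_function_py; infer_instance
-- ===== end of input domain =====

-- B replaces A's hex/binary string round-trips by shift-and-mask integer arithmetic (objective: idiomatic).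

-- module constant SUBSITUTION_BLOCK, used by both A and B
def subBlock : List (List Nat) := [
  [1, 7, 14, 13, 0, 5, 8, 3, 4, 15, 10, 6, 9, 12, 11, 2],
  [8, 14, 2, 5, 6, 9, 1, 12, 15, 4, 11, 0, 13, 10, 3, 7],
  [5, 13, 15, 6, 9, 2, 12, 10, 11, 7, 8, 1, 4, 3, 14, 0],
  [7, 15, 5, 10, 8, 1, 6, 13, 0, 9, 3, 14, 11, 4, 2, 12],
  [12, 8, 2, 1, 13, 4, 15, 6, 7, 0, 10, 5, 3, 14, 9, 11],
  [11, 3, 5, 8, 2, 15, 10, 13, 14, 1, 7, 4, 12, 9, 6, 0],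
  [6, 8, 2, 3, 9, 10, 5, 12, 1, 14, 4, 7, 11, 13, 0, 15],
  [12, 4, 6, 2, 10, 5, 11, 9, 14, 8, 13, 7, 0, 3, 15, 1]]

-- ===== PORT A =====
-- hex(n)[2:] for n ≥ 0: minimal lowercase hex digit string (exact: Python hex is lowercase, no leading zeros)
def hexStr (n : Nat) : List Char :=
  if _h : n < 16 then [Nat.digitChar n]
  else hexStr (n / 16) ++ [Nat.digitChar (n % 16)]
  decreasing_by exact Nat.div_lt_self (by omega) (by omega)

-- bin(n)[2:] for n ≥ 0 (exact: Python bin, no leading zeros)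
def binStr (n : Nat) : List Char :=
  if _h : n < 2 then [Nat.digitChar n]
  else binStr (n / 2) ++ [Nat.digitChar (n % 2)]
  decreasing_by exact Nat.div_lt_self (by omega) (by omega)

-- str.zfill(k) on a digit string (exact: no sign characters occur here)
def zfillC (k : Nat) (l : List Char) : List Char := List.replicate (k - l.length) '0' ++ l

-- int(c, 16) for one char c of '0'..'9'/'a'..'f' (the only chars that occur; exact on those)
def hexCharVal (c : Char) : Nat := if 97 ≤ c.toNat then c.toNat - 87 else c.toNat - 48

-- int(s, b) for a string of lowercase base-b digits (the only strings that occur; exact on those)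
def parseBase (b : Nat) (l : List Char) : Nat := l.foldl (fun a c => a * b + hexCharVal c) 0

def encrypt_function_py (part : Int) (key : Int) : Int :=
  -- temp_val = hex((part + key) % (2**32))[2:].zfill(8); the % result is in [0, 2^32) so toNat is exact
  let s : Nat := (PySem.Int.mod (part + key) 4294967296).toNat
  let temp_val : List Char := zfillC 8 (hexStr s)
  -- for i in range(8): result += hex(SUBSITUTION_BLOCK[i][int(temp_val[i],16)])[2:]
  -- (getD is a totality guard only: each index is provably in range)
  let result : List Char := (List.range 8).foldl
    (fun r i => r ++ hexStr ((subBlock.getD i []).getD (hexCharVal (temp_val.getD i '0')) 0)) []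
  -- result = bin(int(result,16))[2:].zfill(32); result = result[11:] + result[:11]
  let result2 : List Char := zfillC 32 (binStr (parseBase 16 result))
  let result3 : List Char := List.drop 11 result2 ++ List.take 11 result2
  Int.ofNat (parseBase 2 result3)

-- ===== PORT B =====
def encrypt_function_py_alt (part : Int) (key : Int) : Int :=
  -- s = (part + key) & 0xFFFFFFFF  (Python's & on ints is two's-complement, i.e. mod 2^32)
  let s : Nat := (PySem.Int.mod (part + key) 4294967296).toNat
  -- for i in range(8): out |= SUBSITUTION_BLOCK[i][(s >> sh) & 0xF] << sh  where sh = 28 - 4*i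
  let out : Nat := (List.range 8).foldl
    (fun out i => out ||| ((subBlock.getD i []).getD ((s >>> (28 - 4 * i)) &&& 15) 0) <<< (28 - 4 * i)) 0
  -- return ((out << 11) | (out >> 21)) & 0xFFFFFFFF
  Int.ofNat (((out <<< 11) ||| (out >>> 21)) &&& 4294967295)

-- ===== PRECONDITION & SPEC =====
def Spec_encrypt_function_py (part : Int) (key : Int) (out : Int) : Prop := out = encrypt_function_py_alt part key
instance (part : Int) (key : Int) (out : Int) : Decidable (Spec_encrypt_function_py part key out) := by unfold Spec_encrypt_function_py; infer_instance

-- ===== CLAIM (what is proved, stated in full; the proofs are below) =====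
def Claim_equal_encrypt_function_py : Prop := ∀ (part : Int) (key : Int), Dom_encrypt_function_py part key → Spec_encrypt_function_py part key (encrypt_function_py part key)

-- ===== LEMMAS AND PROOFS =====

-- the k-digit base-b expansion of n, as digit characters (proof-side characterisation)
def bExpand (b k n : Nat) : List Char := (List.range k).map (fun i => Nat.digitChar (n / b ^ (k - 1 - i) % b))

theorem hv_dc (d : Nat) (h : d < 16) : hexCharVal (Nat.digitChar d) = d := by
  interval_cases d <;> decide

theorem hexStr_lt (n : Nat) (h : n < 16) : hexStr n = [Nat.digitChar n] := by
  rw [hexStr]; simp [h]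

theorem hexStr_ge (n : Nat) (h : 16 ≤ n) : hexStr n = hexStr (n / 16) ++ [Nat.digitChar (n % 16)] := by
  rw [hexStr]; simp [Nat.not_lt_of_ge h]

theorem binStr_lt (n : Nat) (h : n < 2) : binStr n = [Nat.digitChar n] := by
  rw [binStr]; simp [h]

theorem binStr_ge (n : Nat) (h : 2 ≤ n) : binStr n = binStr (n / 2) ++ [Nat.digitChar (n % 2)] := by
  rw [binStr]; simp [Nat.not_lt_of_ge h]

theorem bExpand_succ_last (b k n : Nat) :
    bExpand b (k + 1) n = bExpand b k (n / b) ++ [Nat.digitChar (n % b)] := by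
  unfold bExpand
  rw [List.range_succ, List.map_append]
  congr 1
  · apply List.map_congr_left
    intro i hi
    rw [List.mem_range] at hi
    rw [Nat.div_div_eq_div_mul, ← pow_succ']
    have he : k - 1 - i + 1 = k + 1 - 1 - i := by omega
    rw [he]
  · simp
theorem bExpand_succ_head (b k n : Nat) :
    bExpand b (k + 1) n = Nat.digitChar (n / b ^ k % b) :: bExpand b k n := by
  unfold bExpand
  rw [List.range_succ_eq_map, List.map_cons, List.map_map]
  congr 1
  apply List.map_congr_left
  intro i hi
  simp only [Function.comp_apply, Nat.succ_eq_add_one]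
  have he : k + 1 - 1 - (i + 1) = k - 1 - i := by omega
  rw [he]

-- generic: any function with the digit-recursion shape, zero-filled to k+1 places, is the (k+1)-digit expansion
theorem gen_len_le (b : Nat) (hb : 2 ≤ b) (f : Nat → List Char)
    (h1 : ∀ n, n < b → f n = [Nat.digitChar n])
    (h2 : ∀ n, b ≤ n → f n = f (n / b) ++ [Nat.digitChar (n % b)]) :
    ∀ k n, n < b ^ (k + 1) → (f n).length ≤ k + 1 := by
  intro k
  induction k with
  | zero => intro n hn; rw [h1 n (by simpa using hn)]; simp
  | succ k ih =>
    intro n hn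
    by_cases hnb : n < b
    · rw [h1 n hnb]; simp
    · rw [h2 n (by omega)]
      have hdiv : n / b < b ^ (k + 1) := by
        rw [Nat.div_lt_iff_lt_mul (by omega)]
        calc n < b ^ (k + 2) := hn
        _ = b ^ (k + 1) * b := by ring
      have := ih (n / b) hdiv
      simp [List.length_append]
      omega

theorem gen_len_ge (b : Nat) (_hb : 2 ≤ b) (f : Nat → List Char)
    (h1 : ∀ n, n < b → f n = [Nat.digitChar n])
    (h2 : ∀ n, b ≤ n → f n = f (n / b) ++ [Nat.digitChar (n % b)]) :
    ∀ k n, b ^ k ≤ n → k + 1 ≤ (f n).length := by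
  intro k
  induction k with
  | zero =>
    intro n _
    by_cases hnb : n < b
    · rw [h1 n hnb]; simp
    · rw [h2 n (by omega)]; simp
  | succ k ih =>
    intro n hn
    have hbn : b ≤ n := le_trans (by calc b = b ^ 1 := (pow_one b).symm
      _ ≤ b ^ (k + 1) := Nat.pow_le_pow_right (by omega) (by omega)) hn
    rw [h2 n hbn]
    have hdiv : b ^ k ≤ n / b := by
      rw [Nat.le_div_iff_mul_le (by omega)]
      calc b ^ k * b = b ^ (k + 1) := by ring
      _ ≤ n := hn
    have := ih (n / b) hdiv
    simp [List.length_append]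
    omega

theorem zfillC_of_le (k : Nat) (l : List Char) (h : k ≤ l.length) : zfillC k l = l := by
  unfold zfillC
  rw [Nat.sub_eq_zero_of_le h]
  simp

theorem zfillC_succ (k : Nat) (l : List Char) (h : l.length ≤ k) :
    zfillC (k + 1) l = '0' :: zfillC k l := by
  unfold zfillC
  rw [show k + 1 - l.length = (k - l.length) + 1 by omega]
  simp [List.replicate_succ]

theorem gen_expand (b : Nat) (hb : 2 ≤ b) (f : Nat → List Char)
    (h1 : ∀ n, n < b → f n = [Nat.digitChar n])
    (h2 : ∀ n, b ≤ n → f n = f (n / b) ++ [Nat.digitChar (n % b)]) :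
    ∀ k n, n < b ^ (k + 1) → zfillC (k + 1) (f n) = bExpand b (k + 1) n := by
  intro k
  induction k with
  | zero =>
    intro n hn
    rw [pow_one] at hn
    rw [h1 n hn, zfillC_of_le 1 _ (by simp)]
    unfold bExpand
    simp [Nat.mod_eq_of_lt hn]
  | succ k ih =>
    intro n hn
    by_cases hsmall : n < b ^ (k + 1)
    · rw [zfillC_succ (k + 1) _ (gen_len_le b hb f h1 h2 k n hsmall), ih n hsmall]
      conv_rhs => rw [bExpand_succ_head]
      congr 1
      rw [Nat.div_eq_of_lt hsmall, Nat.zero_mod]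
      decide
    · have hge : b ^ (k + 1) ≤ n := by omega
      have hbn : b ≤ n := le_trans (by calc b = b ^ 1 := (pow_one b).symm
        _ ≤ b ^ (k + 1) := Nat.pow_le_pow_right (by omega) (by omega)) hge
      have hdivge : b ^ k ≤ n / b := by
        rw [Nat.le_div_iff_mul_le (by omega)]
        calc b ^ k * b = b ^ (k + 1) := by ring
        _ ≤ n := hge
      have hdivlt : n / b < b ^ (k + 1) := by
        rw [Nat.div_lt_iff_lt_mul (by omega)]
        calc n < b ^ (k + 2) := hn
        _ = b ^ (k + 1) * b := by ring
      have hlen : k + 2 ≤ (f n).length := gen_len_ge b hb f h1 h2 (k + 1) n hge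
      have hlen' : k + 1 ≤ (f (n / b)).length := gen_len_ge b hb f h1 h2 k (n / b) hdivge
      rw [zfillC_of_le _ _ hlen, h2 n hbn, bExpand_succ_last,
        ← ih (n / b) hdivlt, zfillC_of_le _ _ hlen']

theorem parse_bExpand (b : Nat) (hb : 2 ≤ b) (hb16 : b ≤ 16) :
    ∀ k n acc, n < b ^ k →
      (bExpand b k n).foldl (fun a c => a * b + hexCharVal c) acc = acc * b ^ k + n := by
  intro k
  induction k with
  | zero =>
    intro n acc hn
    rw [pow_zero] at hn
    interval_cases n
    simp [bExpand]
  | succ k ih =>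
    intro n acc hn
    rw [bExpand_succ_last, List.foldl_append]
    have hdiv : n / b < b ^ k := by
      rw [Nat.div_lt_iff_lt_mul (by omega)]
      calc n < b ^ (k + 1) := hn
      _ = b ^ k * b := by ring
    rw [ih (n / b) acc hdiv]
    simp only [List.foldl_cons, List.foldl_nil]
    rw [hv_dc (n % b) (lt_of_lt_of_le (Nat.mod_lt n (by omega)) hb16)]
    calc (acc * b ^ k + n / b) * b + n % b
        = acc * (b ^ k * b) + (b * (n / b) + n % b) := by ring
      _ = acc * b ^ (k + 1) + n := by rw [Nat.div_add_mod, ← pow_succ]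

-- dropping j leading digits of a k-digit expansion keeps the low (k-j)-digit expansion
theorem mod_pow_div_mod (b n m e : Nat) (_hb : 2 ≤ b) (h : e < m) :
    n % b ^ m / b ^ e % b = n / b ^ e % b := by
  have hdvd : b ^ e * b ∣ b ^ m := by
    rw [← pow_succ]
    exact pow_dvd_pow b (by omega)
  rw [← Nat.mod_mul_right_div_self (n % b ^ m) (b ^ e) b, Nat.mod_mod_of_dvd n hdvd,
    Nat.mod_mul_right_div_self n (b ^ e) b]

theorem bExpand_drop (b k j n : Nat) (hb : 2 ≤ b) (hj : j ≤ k) :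
    List.drop j (bExpand b k n) = bExpand b (k - j) (n % b ^ (k - j)) := by
  apply List.ext_getElem
  · simp [bExpand]
  · intro i h1 h2
    simp only [bExpand, List.getElem_drop, List.getElem_map, List.getElem_range]
    simp only [bExpand, List.length_drop, List.length_map, List.length_range] at h1 h2
    rw [mod_pow_div_mod b n (k - j) ((k - j) - 1 - i) hb (by omega)]
    have he : k - 1 - (j + i) = k - j - 1 - i := by omega
    rw [he]

theorem bExpand_take (b k j n : Nat) (hj : j ≤ k) :
    List.take j (bExpand b k n) = bExpand b j (n / b ^ (k - j)) := by
  apply List.ext_getElem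
  · simp [bExpand]; omega
  · intro i h1 h2
    simp only [bExpand, List.getElem_take, List.getElem_map, List.getElem_range]
    simp only [bExpand, List.length_take, List.length_map, List.length_range] at h1 h2
    rw [Nat.div_div_eq_div_mul, ← pow_add]
    have he : k - 1 - i = k - j + (j - 1 - i) := by omega
    rw [he]

theorem or_eq_add (a c k : Nat) (ha : a % 2 ^ k = 0) (hc : c < 2 ^ k) : a ||| c = a + c := by
  obtain ⟨d, hd⟩ := Nat.dvd_of_mod_eq_zero ha
  subst hd
  exact (Nat.two_pow_add_eq_or_of_lt hc d).symm

-- every substitution value is a single hex digit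
theorem sub_lt : ∀ i, i < 8 → ∀ d, d < 16 → (subBlock.getD i []).getD d 0 < 16 := by
  decide

-- the main computation, as a statement about the common 32-bit word s
theorem rot_mod (S : Nat) (hS : S < 4294967296) :
    S % 2097152 * 2048 + S / 2097152 = (S * 2 ^ 11 + S / 2097152) % 4294967296 := by
  have h1 : S * 2 ^ 11 = S / 2097152 * 4294967296 + S % 2097152 * 2048 := by omega
  rw [h1, Nat.add_assoc, Nat.add_comm (S / 2097152 * 4294967296), Nat.add_mul_mod_self_right,
    Nat.mod_eq_of_lt (show S % 2097152 * 2048 + S / 2097152 < 4294967296 by omega)]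

theorem core_eq (s : Nat) (hs : s < 4294967296) :
    parseBase 2
      (List.drop 11 (zfillC 32 (binStr (parseBase 16 ((List.range 8).foldl
        (fun r i => r ++ hexStr ((subBlock.getD i []).getD
          (hexCharVal ((zfillC 8 (hexStr s)).getD i '0')) 0)) [])))) ++
       List.take 11 (zfillC 32 (binStr (parseBase 16 ((List.range 8).foldl
        (fun r i => r ++ hexStr ((subBlock.getD i []).getD
          (hexCharVal ((zfillC 8 (hexStr s)).getD i '0')) 0)) [])))))
    = (((List.range 8).foldl
        (fun out i => out ||| ((subBlock.getD i []).getD ((s >>> (28 - 4 * i)) &&& 15) 0)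
          <<< (28 - 4 * i)) 0 <<< 11) |||
       ((List.range 8).foldl
        (fun out i => out ||| ((subBlock.getD i []).getD ((s >>> (28 - 4 * i)) &&& 15) 0)
          <<< (28 - 4 * i)) 0 >>> 21)) &&& 4294967295 := by
  have hand : ∀ x : Nat, x &&& 15 = x % 16 := by
    intro x
    have h := Nat.and_two_pow_sub_one_eq_mod x 4
    norm_num at h
    exact h
  have htv : zfillC 8 (hexStr s) = bExpand 16 8 s :=
    gen_expand 16 (by omega) hexStr hexStr_lt hexStr_ge 7 s (by norm_num; omega)
  have hexp8 : bExpand 16 8 s =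
      [Nat.digitChar (s / 268435456 % 16), Nat.digitChar (s / 16777216 % 16),
       Nat.digitChar (s / 1048576 % 16), Nat.digitChar (s / 65536 % 16),
       Nat.digitChar (s / 4096 % 16), Nat.digitChar (s / 256 % 16),
       Nat.digitChar (s / 16 % 16), Nat.digitChar (s % 16)] := by
    simp [bExpand, List.range_succ]
  have hrange : List.range 8 = [0, 1, 2, 3, 4, 5, 6, 7] := by decide
  simp only [hrange, List.foldl_cons, List.foldl_nil, htv, hexp8, List.getD_cons_zero,
    List.getD_cons_succ, Nat.shiftRight_eq_div_pow, hand]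
  norm_num
  -- name the eight nibbles and record their bounds
  have hd0 : s / 268435456 % 16 < 16 := Nat.mod_lt _ (by omega)
  have hd1 : s / 16777216 % 16 < 16 := Nat.mod_lt _ (by omega)
  have hd2 : s / 1048576 % 16 < 16 := Nat.mod_lt _ (by omega)
  have hd3 : s / 65536 % 16 < 16 := Nat.mod_lt _ (by omega)
  have hd4 : s / 4096 % 16 < 16 := Nat.mod_lt _ (by omega)
  have hd5 : s / 256 % 16 < 16 := Nat.mod_lt _ (by omega)
  have hd6 : s / 16 % 16 < 16 := Nat.mod_lt _ (by omega)
  have hd7 : s % 16 < 16 := Nat.mod_lt _ (by omega)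
  generalize hg0 : s / 268435456 % 16 = d0 at *
  generalize hg1 : s / 16777216 % 16 = d1 at *
  generalize hg2 : s / 1048576 % 16 = d2 at *
  generalize hg3 : s / 65536 % 16 = d3 at *
  generalize hg4 : s / 4096 % 16 = d4 at *
  generalize hg5 : s / 256 % 16 = d5 at *
  generalize hg6 : s / 16 % 16 = d6 at *
  generalize hg7 : s % 16 = d7 at *
  simp only [hv_dc d0 hd0, hv_dc d1 hd1, hv_dc d2 hd2, hv_dc d3 hd3, hv_dc d4 hd4,
    hv_dc d5 hd5, hv_dc d6 hd6, hv_dc d7 hd7, ← List.getD_eq_getElem?_getD]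
  -- name the eight substituted values and record their bounds
  have hv0 : (subBlock.getD 0 []).getD d0 0 < 16 := sub_lt 0 (by omega) d0 hd0
  have hv1 : (subBlock.getD 1 []).getD d1 0 < 16 := sub_lt 1 (by omega) d1 hd1
  have hv2 : (subBlock.getD 2 []).getD d2 0 < 16 := sub_lt 2 (by omega) d2 hd2
  have hv3 : (subBlock.getD 3 []).getD d3 0 < 16 := sub_lt 3 (by omega) d3 hd3
  have hv4 : (subBlock.getD 4 []).getD d4 0 < 16 := sub_lt 4 (by omega) d4 hd4
  have hv5 : (subBlock.getD 5 []).getD d5 0 < 16 := sub_lt 5 (by omega) d5 hd5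
  have hv6 : (subBlock.getD 6 []).getD d6 0 < 16 := sub_lt 6 (by omega) d6 hd6
  have hv7 : (subBlock.getD 7 []).getD d7 0 < 16 := sub_lt 7 (by omega) d7 hd7
  generalize hw0 : (subBlock.getD 0 []).getD d0 0 = v0 at *
  generalize hw1 : (subBlock.getD 1 []).getD d1 0 = v1 at *
  generalize hw2 : (subBlock.getD 2 []).getD d2 0 = v2 at *
  generalize hw3 : (subBlock.getD 3 []).getD d3 0 = v3 at *
  generalize hw4 : (subBlock.getD 4 []).getD d4 0 = v4 at *
  generalize hw5 : (subBlock.getD 5 []).getD d5 0 = v5 at *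
  generalize hw6 : (subBlock.getD 6 []).getD d6 0 = v6 at *
  generalize hw7 : (subBlock.getD 7 []).getD d7 0 = v7 at *
  -- A side: the eight substituted hex digits concatenate into one 32-bit word
  rw [hexStr_lt v0 hv0, hexStr_lt v1 hv1, hexStr_lt v2 hv2, hexStr_lt v3 hv3,
    hexStr_lt v4 hv4, hexStr_lt v5 hv5, hexStr_lt v6 hv6, hexStr_lt v7 hv7]
  simp only [List.nil_append, List.cons_append]
  simp only [parseBase, List.foldl_cons, List.foldl_nil,
    hv_dc v0 hv0, hv_dc v1 hv1, hv_dc v2 hv2, hv_dc v3 hv3,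
    hv_dc v4 hv4, hv_dc v5 hv5, hv_dc v6 hv6, hv_dc v7 hv7]
  set OUT := ((((((((0 * 16 + v0) * 16 + v1) * 16 + v2) * 16 + v3) * 16 + v4) * 16 + v5)
    * 16 + v6) * 16 + v7) with hOUT
  have hout : OUT < 4294967296 := by omega
  have hbin : zfillC 32 (binStr OUT) = bExpand 2 32 OUT :=
    gen_expand 2 (by omega) binStr binStr_lt binStr_ge 31 OUT (by norm_num; omega)
  rw [hbin, bExpand_drop 2 32 11 OUT (by omega) (by omega), bExpand_take 2 32 11 OUT (by omega)]
  norm_num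
  have hp1 := parse_bExpand 2 (by omega) (by omega) 21 (OUT % 2097152) 0 (by omega)
  have hp2 := parse_bExpand 2 (by omega) (by omega) 11 (OUT / 2097152)
    (List.foldl (fun a c => a * 2 + hexCharVal c) 0 (bExpand 2 21 (OUT % 2097152)))
    (by omega)
  norm_num at hp1 hp2
  rw [hp1] at hp2 ⊢
  rw [hp2]
  -- B side: ors of disjoint shifted nibbles are sums
  simp only [Nat.shiftLeft_eq]
  rw [or_eq_add (v0 * 2 ^ 28) (v1 * 2 ^ 24) 28 (by omega) (by omega)]
  rw [or_eq_add _ (v2 * 2 ^ 20) 24 (by omega) (by omega)]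
  rw [or_eq_add _ (v3 * 2 ^ 16) 20 (by omega) (by omega)]
  rw [or_eq_add _ (v4 * 2 ^ 12) 16 (by omega) (by omega)]
  rw [or_eq_add _ (v5 * 2 ^ 8) 12 (by omega) (by omega)]
  rw [or_eq_add _ (v6 * 2 ^ 4) 8 (by omega) (by omega)]
  rw [or_eq_add _ v7 4 (by omega) (by omega)]
  rw [or_eq_add _ _ 11 (by omega) (by omega)]
  have hmask : ∀ x : Nat, x &&& 4294967295 = x % 4294967296 := by
    intro x
    have h := Nat.and_two_pow_sub_one_eq_mod x 32
    norm_num at h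
    exact h
  rw [hmask]
  have hsum : OUT = v0 * 2 ^ 28 + v1 * 2 ^ 24 + v2 * 2 ^ 20 + v3 * 2 ^ 16 + v4 * 2 ^ 12
      + v5 * 2 ^ 8 + v6 * 2 ^ 4 + v7 := by rw [hOUT]; ring
  rw [← hsum]
  exact rot_mod OUT hout

theorem mod_toNat_lt (x : Int) : (PySem.Int.mod x 4294967296).toNat < 4294967296 := by
  rw [PySem.Int.mod_eq_emod_of_pos (show (0:Int) < 4294967296 by omega)]
  have h1 := Int.emod_nonneg x (show (4294967296 : Int) ≠ 0 by omega)
  have h2 := Int.emod_lt_of_pos x (show (0 : Int) < 4294967296 by omega)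
  omega

-- ===== VERDICT (by name: the statement is the Claim_ definition above) =====
theorem encrypt_function_py_spec : Claim_equal_encrypt_function_py := by
  intro part key _
  unfold Spec_encrypt_function_py encrypt_function_py encrypt_function_py_alt
  exact congrArg Int.ofNat (core_eq _ (mod_toNat_lt (part + key)))
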